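-- pv_equiv track=rewrite | github.com/chinnichaitanya/NLP-SpellChecker | ProjectSubmission/WordCheck/bin/editex.py | editexlettersCode
-- ===== SOURCE A (Python) =====
-- def editexlettersCode(l1, l2):
-- 	num = [0, 0]
-- 	letters = [l1, l2]
-- 	for index in [0, 1]:
-- 		if(letters[index] == 'a' or letters[index] == 'e' or letters[index] == 'i' or letters[index] == 'o' or letters[index] == 'u' or letters[index] == 'y'):
-- 			num[index] += pow(2, 9)
-- 		if(letters[index] == 'b' or letters[index] == 'p'):
-- 			num[index] += pow(2, 8)
-- 		if(letters[index] == 'c' or letters[index] == 'k' or letters[index] == 'q'):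
-- 			num[index] += pow(2, 7)
-- 		if(letters[index] == 'd' or letters[index] == 't'):
-- 			num[index] += pow(2, 6)
-- 		if(letters[index] == 'l' or letters[index] == 'r'):
-- 			num[index] += pow(2, 5)
-- 		if(letters[index] == 'm' or letters[index] == 'n'):
-- 			num[index] += pow(2, 4)
-- 		if(letters[index] == 'g' or letters[index] == 'j'):
-- 			num[index] += pow(2, 3)
-- 		if(letters[index] == 'f' or letters[index] == 'p' or letters[index] == 'v'):
-- 			num[index] += pow(2, 2)
-- 		if(letters[index] == 'x' or letters[index] == 's' or letters[index] == 'z'):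
-- 			num[index] += pow(2, 1)
-- 		if(letters[index] == 'c' or letters[index] == 's' or letters[index] == 'z'):
-- 			num[index] += pow(2, 0)
-- 	if((num[0] & num[1]) > 0):
-- 		return True
-- 	else:
-- 		return False
-- ===== SOURCE B (Python) =====
-- EDITEX_GROUPS = [
--     ['a', 'e', 'i', 'o', 'u', 'y'],
--     ['b', 'p'],
--     ['c', 'k', 'q'],
--     ['d', 't'],
--     ['l', 'r'],
--     ['m', 'n'],
--     ['g', 'j'],
--     ['f', 'p', 'v'],
--     ['x', 's', 'z'],
--     ['c', 's', 'z'],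
-- ]
--
-- def editexlettersCode(l1, l2):
--     for group in EDITEX_GROUPS:
--         if l1 in group and l2 in group:
--             return True
--     return False
-- ===== Notes on version B (the rewrite author's own statement) =====
-- stated objective: simpler
-- what changed: Replaces the two per-letter bitmask accumulations and the bitwise AND by an explicit list of letter groups scanned once, returning True as soon as one group contains both letters.
import Mathlib
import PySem

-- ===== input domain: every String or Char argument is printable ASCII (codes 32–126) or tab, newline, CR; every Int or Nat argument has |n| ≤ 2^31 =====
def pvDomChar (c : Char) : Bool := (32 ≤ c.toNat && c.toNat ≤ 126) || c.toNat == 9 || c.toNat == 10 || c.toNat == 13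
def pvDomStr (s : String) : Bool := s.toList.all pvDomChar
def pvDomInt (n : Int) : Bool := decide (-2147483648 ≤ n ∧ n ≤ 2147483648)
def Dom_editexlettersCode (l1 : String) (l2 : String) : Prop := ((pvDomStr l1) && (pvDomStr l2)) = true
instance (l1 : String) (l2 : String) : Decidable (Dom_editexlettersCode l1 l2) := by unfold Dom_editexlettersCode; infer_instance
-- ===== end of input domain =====

-- B replaces A's two bitmask accumulations + bitwise AND by a direct scan of the letter groups (simpler).

-- ===== PORT A =====
-- A's loop body (the same if-chain is run for index 0 and 1, mutating num[index] from 0);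
-- transliterated as a helper computing the accumulated num for one letter. Values are
-- nonnegative sums of powers of two, so Nat accumulation is exact.
def editexNum (l : String) : Nat :=
  let num := 0
  let num := if l = "a" ∨ l = "e" ∨ l = "i" ∨ l = "o" ∨ l = "u" ∨ l = "y" then num + 2 ^ 9 else num
  let num := if l = "b" ∨ l = "p" then num + 2 ^ 8 else num
  let num := if l = "c" ∨ l = "k" ∨ l = "q" then num + 2 ^ 7 else num
  let num := if l = "d" ∨ l = "t" then num + 2 ^ 6 else num
  let num := if l = "l" ∨ l = "r" then num + 2 ^ 5 else num
  let num := if l = "m" ∨ l = "n" then num + 2 ^ 4 else num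
  let num := if l = "g" ∨ l = "j" then num + 2 ^ 3 else num
  let num := if l = "f" ∨ l = "p" ∨ l = "v" then num + 2 ^ 2 else num
  let num := if l = "x" ∨ l = "s" ∨ l = "z" then num + 2 ^ 1 else num
  let num := if l = "c" ∨ l = "s" ∨ l = "z" then num + 2 ^ 0 else num
  num

def editexlettersCode (l1 : String) (l2 : String) : Bool :=
  let num0 := editexNum l1
  let num1 := editexNum l2
  if Nat.land num0 num1 > 0 then true else false

-- ===== PORT B =====
def editexGroups : List (List String) :=
  [["a", "e", "i", "o", "u", "y"], ["b", "p"], ["c", "k", "q"], ["d", "t"],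
   ["l", "r"], ["m", "n"], ["g", "j"], ["f", "p", "v"], ["x", "s", "z"], ["c", "s", "z"]]

def editexlettersCode_alt (l1 : String) (l2 : String) : Bool :=
  editexGroups.any (fun g => g.contains l1 && g.contains l2)

-- ===== PRECONDITION & SPEC =====
def Spec_editexlettersCode (l1 : String) (l2 : String) (out : Bool) : Prop := out = editexlettersCode_alt l1 l2
instance (l1 : String) (l2 : String) (out : Bool) : Decidable (Spec_editexlettersCode l1 l2 out) := by unfold Spec_editexlettersCode; infer_instance

-- ===== CLAIM (what is proved, stated in full; the proofs are below) =====
def Claim_equal_editexlettersCode : Prop := ∀ (l1 : String) (l2 : String), Dom_editexlettersCode l1 l2 → Spec_editexlettersCode l1 l2 (editexlettersCode l1 l2)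

-- ===== LEMMAS AND PROOFS =====

-- the letters occurring in any group / any condition of A
def pvLetters : List String :=
  ["a", "e", "i", "o", "u", "y", "b", "p", "c", "k", "q", "d", "t",
   "l", "r", "m", "n", "g", "j", "f", "v", "x", "s", "z"]

theorem editexNum_notin (l : String) (h : l ∉ pvLetters) : editexNum l = 0 := by
  simp [pvLetters] at h
  simp [editexNum, h]

theorem alt_notin_left (l1 l2 : String) (h : l1 ∉ pvLetters) : editexlettersCode_alt l1 l2 = false := by
  simp [pvLetters] at h
  simp [editexlettersCode_alt, editexGroups, h]

theorem alt_notin_right (l1 l2 : String) (h : l2 ∉ pvLetters) : editexlettersCode_alt l1 l2 = false := by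
  simp [pvLetters] at h
  simp [editexlettersCode_alt, editexGroups, h]

theorem editex_eq (l1 l2 : String) : editexlettersCode l1 l2 = editexlettersCode_alt l1 l2 := by
  by_cases h1 : l1 ∈ pvLetters
  · by_cases h2 : l2 ∈ pvLetters
    · fin_cases h1 <;> fin_cases h2 <;> decide
    · rw [alt_notin_right l1 l2 h2]
      simp [editexlettersCode, editexNum_notin l2 h2, Nat.land]
  · rw [alt_notin_left l1 l2 h1]
    simp [editexlettersCode, editexNum_notin l1 h1, Nat.land]

-- ===== VERDICT (by name: the statement is the Claim_ definition above) =====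
theorem editexlettersCode_spec : Claim_equal_editexlettersCode := by
  intro l1 l2 _
  unfold Spec_editexlettersCode
  exact editex_eq l1 l2
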